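-- pv_equiv track=rewrite | github.com/Confuzzl/sbu-cse214-ganapython | test.py | grouping_better
-- ===== SOURCE A (Python) =====
-- import math
--
-- def is_square(n: int):
--     return math.isqrt(n) ** 2 == n
--
-- def grouping_better(arr: list[int]):
--     n = len(arr)
--     left = [0 for _ in range(n)]
--     left_count = 0
--     right = [0 for _ in range(n)]
--     right_count = 0
--     for n in arr:
--         if is_square(n):
--             left[left_count] = n
--             left_count += 1
--         else:
--             right[right_count] = n
--             right_count += 1
--     for i in range(left_count):
--         arr[i] = left[i]
--     for i in range(right_count):
--         arr[left_count + i] = right[i]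
--     return arr
-- ===== SOURCE B (Python) =====
-- import math
--
-- def is_square(n: int):
--     return math.isqrt(n) ** 2 == n
--
-- def grouping_better(arr: list[int]):
--     # stable sort by boolean key: squares (False = 0) first, order preserved within groups;
--     # mutates arr in place and returns it, like A; raises ValueError on negatives, like A
--     arr.sort(key=lambda x: not is_square(x))
--     return arr
-- ===== Notes on version B (the rewrite author's own statement) =====
-- stated objective: idiomatic
-- what changed: Replaced the manual two-scratch-buffer counting partition and copy-back loops with a single in-place stable sort keyed by 'not is_square(x)', which preserves relative order within each group and yields the identical partition.
import Mathlib
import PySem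

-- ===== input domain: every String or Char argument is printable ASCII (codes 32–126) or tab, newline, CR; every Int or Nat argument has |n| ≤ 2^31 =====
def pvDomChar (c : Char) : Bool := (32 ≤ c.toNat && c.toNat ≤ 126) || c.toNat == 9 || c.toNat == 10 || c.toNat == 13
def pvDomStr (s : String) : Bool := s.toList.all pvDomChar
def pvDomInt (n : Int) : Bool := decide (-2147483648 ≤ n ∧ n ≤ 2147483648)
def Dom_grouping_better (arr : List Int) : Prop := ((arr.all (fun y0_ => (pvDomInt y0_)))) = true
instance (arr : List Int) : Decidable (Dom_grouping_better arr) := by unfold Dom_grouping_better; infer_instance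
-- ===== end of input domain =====

-- B replaces A's two-scratch-buffer counting partition with one stable sort by a boolean key;
-- both Pythons mutate arr in place and return it — the equivalence proved here is about the return value.

-- ===== PORT A =====
-- is_square: math.isqrt(n)**2 == n; exact for 0 ≤ n (Pre_ excludes negatives, where Python raises ValueError)
def pvIsSquare (n : Int) : Bool := (Int.ofNat (Nat.sqrt n.toNat)) ^ 2 == n

def grouping_better (arr : List Int) : List Int :=
  let n := PySem.List.len arr
  let left := (PySem.List.pyRange 0 n 1).map (fun _ => (0 : Int))
  let right := (PySem.List.pyRange 0 n 1).map (fun _ => (0 : Int))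
  let st := arr.foldl
    (fun (st : List Int × Int × List Int × Int) x =>
      let (left, left_count, right, right_count) := st
      if pvIsSquare x then
        (PySem.List.pySetD left left_count x, left_count + 1, right, right_count)
      else
        (left, left_count, PySem.List.pySetD right right_count x, right_count + 1))
    (left, 0, right, 0)
  let (left, left_count, right, right_count) := st
  let arr1 := (PySem.List.pyRange 0 left_count 1).foldl
    (fun a i => PySem.List.pySetD a i (PySem.List.pyGetD left i 0)) arr
  (PySem.List.pyRange 0 right_count 1).foldl
    (fun a i => PySem.List.pySetD a (left_count + i) (PySem.List.pyGetD right i 0)) arr1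


-- ===== PORT B =====
-- arr.sort(key=lambda x: not is_square(x)) then return arr; the key is is_square's body, exact for 0 ≤ x
def grouping_better_alt (arr : List Int) : List Int :=
  PySem.List.sorted arr (fun x => !((Int.ofNat (Nat.sqrt x.toNat)) ^ 2 == x)) false

-- ===== PRECONDITION & SPEC =====
-- Pre_ excludes lists containing a negative element: math.isqrt raises ValueError there, in A and in B alike.
def Pre_grouping_better (arr : List Int) : Prop := ∀ x ∈ arr, 0 ≤ x
instance (arr : List Int) : Decidable (Pre_grouping_better arr) := by unfold Pre_grouping_better; infer_instance
def pvWitness_grouping_better : List Int := [3, 4, 0, 7, 9, 9, 2]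

def Spec_grouping_better (arr : List Int) (out : List Int) : Prop := out = grouping_better_alt arr
instance (arr : List Int) (out : List Int) : Decidable (Spec_grouping_better arr out) := by unfold Spec_grouping_better; infer_instance

-- ===== CLAIM (what is proved, stated in full; the proofs are below) =====
def Claim_equal_grouping_better : Prop := ∀ (arr : List Int), Dom_grouping_better arr → Pre_grouping_better arr → Spec_grouping_better arr (grouping_better arr)

-- ===== LEMMAS AND PROOFS =====

-- A's partition-fold step function, named for the proofs
def pvStep (st : List Int × Int × List Int × Int) (x : Int) : List Int × Int × List Int × Int :=
  let (left, left_count, right, right_count) := st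
  if pvIsSquare x then
    (PySem.List.pySetD left left_count x, left_count + 1, right, right_count)
  else
    (left, left_count, PySem.List.pySetD right right_count x, right_count + 1)

theorem pv_insertBy_cons (f : Int → Int → Bool) (x y : Int) (ys : List Int) :
    PySem.List.insertBy f x (y :: ys) = if f x y then x :: y :: ys else y :: PySem.List.insertBy f x ys := rfl

theorem pv_insert_app (x : Int) (hx : pvIsSquare x = false) : ∀ l : List Int,
    PySem.List.insertBy (fun a b => decide ((!pvIsSquare a) < (!pvIsSquare b))) x l = l ++ [x] := by
  intro l
  induction l with
  | nil => rfl
  | cons y ys ih =>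
    rw [pv_insertBy_cons, ih]
    simp [hx, Bool.lt_iff]

theorem pv_insert_mid (x : Int) (hx : pvIsSquare x = true) (T : List Int)
    (hT : ∀ y ∈ T, pvIsSquare y = false) : ∀ F : List Int, (∀ y ∈ F, pvIsSquare y = true) →
    PySem.List.insertBy (fun a b => decide ((!pvIsSquare a) < (!pvIsSquare b))) x (F ++ T) = F ++ x :: T := by
  intro F
  induction F with
  | nil =>
    intro _
    cases T with
    | nil => rfl
    | cons t ts =>
      have ht : pvIsSquare t = false := hT t (by simp)
      rw [List.nil_append, pv_insertBy_cons]
      simp [hx, ht, Bool.lt_iff]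
  | cons f fs ih =>
    intro hF
    have hf : pvIsSquare f = true := hF f (by simp)
    rw [List.cons_append, pv_insertBy_cons, ih (fun y hy => hF y (by simp [hy]))]
    simp [hx, hf]

theorem pv_sortFold (xs : List Int) : ∀ (F T : List Int),
    (∀ y ∈ F, pvIsSquare y = true) → (∀ y ∈ T, pvIsSquare y = false) →
    xs.foldl
      (fun acc x => PySem.List.insertBy
        (fun a b => decide ((!pvIsSquare a) < (!pvIsSquare b))) x acc) (F ++ T)
    = (F ++ xs.filter pvIsSquare) ++ (T ++ xs.filter (fun x => !pvIsSquare x)) := by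
  induction xs with
  | nil => intro F T _ _; simp
  | cons x xs ih =>
    intro F T hF hT
    rw [List.foldl_cons]
    by_cases hx : pvIsSquare x = true
    · rw [pv_insert_mid x hx T hT F hF]
      have hFx : ∀ y ∈ F ++ [x], pvIsSquare y = true := by
        intro y hy
        rcases List.mem_append.1 hy with h | h
        · exact hF y h
        · simp at h; simpa [h] using hx
      have h2 : F ++ x :: T = (F ++ [x]) ++ T := by simp
      rw [h2, ih (F ++ [x]) T hFx hT]
      simp [hx]
    · have hx' : pvIsSquare x = false := by simpa using hx
      rw [pv_insert_app x hx' (F ++ T)]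
      have hTx : ∀ y ∈ T ++ [x], pvIsSquare y = false := by
        intro y hy
        rcases List.mem_append.1 hy with h | h
        · exact hT y h
        · simp at h; simpa [h] using hx'
      have h2 : (F ++ T) ++ [x] = F ++ (T ++ [x]) := by simp
      rw [h2, ih F (T ++ [x]) hF hTx]
      simp [hx']


theorem pv_set_mid (p s t : List Int) (v : Int) (ht : t ≠ []) :
    (p ++ s ++ t).set (p.length + s.length) v = p ++ (s ++ [v]) ++ t.tail := by
  rw [List.append_assoc, List.set_append, if_neg (by omega)]
  rw [List.set_append, if_neg (by omega)]
  have h0 : p.length + s.length - p.length - s.length = 0 := by omega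
  rw [h0]
  cases t with
  | nil => exact absurd rfl ht
  | cons a as => simp

theorem pv_writeLoop (k : Nat) : ∀ (src arr : List Int) (off : Nat),
    off + k ≤ arr.length → k ≤ src.length →
    (PySem.List.pyRange 0 (k : Int) 1).foldl
      (fun a i => PySem.List.pySetD a ((off : Int) + i) (PySem.List.pyGetD src i 0)) arr
    = arr.take off ++ src.take k ++ arr.drop (off + k) := by
  induction k with
  | zero =>
    intro src arr off h1 h2
    simp
  | succ k ih =>
    intro src arr off h1 h2
    have hcast : ((k + 1 : Nat) : Int) = (k : Int) + 1 := by push_cast; ring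
    rw [hcast, PySem.List.pyRange_one_succ_right (by positivity), List.foldl_append,
        ih src arr off (by omega) (by omega)]
    simp only [List.foldl_cons, List.foldl_nil]
    have hidx : ((off : Int) + (k : Int)) = ((off + k : Nat) : Int) := by push_cast; ring
    rw [PySem.List.pyGetD_natCast, hidx, PySem.List.pySetD_natCast]
    have hlen1 : (arr.take off).length = off := by simp; omega
    have hlen2 : (src.take k).length = k := by simp; omega
    have hset := pv_set_mid (arr.take off) (src.take k) (arr.drop (off + k)) (src.getD k 0)
      (by simp; omega)
    rw [hlen1, hlen2] at hset
    rw [hset, List.tail_drop]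
    have hsrc : src.take (k + 1) = src.take k ++ [src.getD k 0] := by
      rw [List.take_add_one, List.getD_eq_getElem src 0 (by omega),
          List.getElem?_eq_getElem (by omega)]
      rfl
    rw [hsrc]
    ring_nf

theorem pv_take_set_succ (l : List Int) (i : Nat) (x : Int) (h : i < l.length) :
    (l.set i x).take (i + 1) = l.take i ++ [x] := by
  rw [List.take_set, List.take_add_one, List.getElem?_eq_getElem h]
  have hlen : (l.take i).length = i := by simp; omega
  rw [show (some l[i]).toList = [l[i]] from rfl, List.set_append, if_neg (by omega)]
  simp [hlen]


theorem pv_foldA (xs : List Int) : ∀ (left right : List Int) (lc rc : Nat),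
    lc + xs.length ≤ left.length → rc + xs.length ≤ right.length →
    xs.foldl pvStep (left, (lc : Int), right, (rc : Int))
    = (left.take lc ++ xs.filter pvIsSquare ++ left.drop (lc + (xs.filter pvIsSquare).length),
       (((lc + (xs.filter pvIsSquare).length : Nat)) : Int),
       right.take rc ++ xs.filter (fun x => !pvIsSquare x) ++ right.drop (rc + (xs.filter (fun x => !pvIsSquare x)).length),
       (((rc + (xs.filter (fun x => !pvIsSquare x)).length : Nat)) : Int)) := by
  induction xs with
  | nil =>
    intro left right lc rc h1 h2
    simp
  | cons x xs ih =>
    intro left right lc rc h1 h2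
    simp only [List.length_cons] at h1 h2
    rw [List.foldl_cons]
    by_cases hx : pvIsSquare x = true
    · have hstep : pvStep (left, (lc : Int), right, (rc : Int)) x
          = (left.set lc x, ((lc + 1 : Nat) : Int), right, (rc : Int)) := by
        simp [pvStep, hx]
      rw [hstep, ih (left.set lc x) right (lc + 1) rc
            (by simp only [List.length_set]; omega) (by omega)]
      rw [pv_take_set_succ left lc x (by omega), List.drop_set_of_lt (by omega)]
      simp only [List.filter_cons, hx, if_true, Prod.mk.injEq]
      refine ⟨?_, ?_, rfl, rfl⟩
      · simp [List.append_assoc]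
        omega
      · push_cast [List.length_cons]
        ring
    · have hx' : pvIsSquare x = false := by simpa using hx
      have hstep : pvStep (left, (lc : Int), right, (rc : Int)) x
          = (left, (lc : Int), right.set rc x, ((rc + 1 : Nat) : Int)) := by
        simp [pvStep, hx']
      rw [hstep, ih left (right.set rc x) lc (rc + 1)
            (by omega) (by simp only [List.length_set]; omega)]
      rw [pv_take_set_succ right rc x (by omega), List.drop_set_of_lt (by omega)]
      simp only [List.filter_cons, hx', Bool.not_false, Prod.mk.injEq]
      refine ⟨rfl, ?_, ?_, ?_⟩
      · push_cast [List.length_cons]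
        ring
      · simp [List.append_assoc]
        omega
      · push_cast [List.length_cons]
        ring


theorem pv_A_eq (arr : List Int) :
    grouping_better arr = arr.filter pvIsSquare ++ arr.filter (fun x => !pvIsSquare x) := by
  have hrep : (PySem.List.pyRange 0 (PySem.List.len arr) 1).map (fun _ => (0 : Int))
      = List.replicate arr.length 0 := by
    rw [List.map_const']
    congr 1
    simp [PySem.List.length_pyRange_one]
  set L := arr.filter pvIsSquare with hL
  set R := arr.filter (fun x => !pvIsSquare x) with hR
  have hsum : L.length + R.length = arr.length := (List.length_eq_length_filter_add pvIsSquare).symm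
  have hc : L.length ≤ arr.length := by omega
  unfold grouping_better
  simp only [hrep]
  rw [show (fun (st : List Int × Int × List Int × Int) x =>
      let (left, left_count, right, right_count) := st
      if pvIsSquare x then
        (PySem.List.pySetD left left_count x, left_count + 1, right, right_count)
      else
        (left, left_count, PySem.List.pySetD right right_count x, right_count + 1)) = pvStep from rfl]
  have hfold := pv_foldA arr (List.replicate arr.length 0) (List.replicate arr.length 0) 0 0
        (by simp) (by simp)
  norm_num at hfold
  rw [hfold]
  dsimp only
  simp only [← hL, ← hR]
  -- first write loop (offset 0)
  have hfun : (fun (a : List Int) (i : Int) =>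
        PySem.List.pySetD a i (PySem.List.pyGetD (L ++ List.replicate (arr.length - L.length) (0:Int)) i 0))
      = (fun a i => PySem.List.pySetD a (((0:Nat):Int) + i) (PySem.List.pyGetD (L ++ List.replicate (arr.length - L.length) (0:Int)) i 0)) := by
    funext a i
    norm_num
  rw [hfun, pv_writeLoop L.length _ arr 0 (by omega) (by simp)]
  have htakeL : (L ++ List.replicate (arr.length - L.length) (0:Int)).take L.length = L := by
    rw [List.take_append]
    simp
  rw [htakeL]
  simp only [List.take_zero, List.nil_append, Nat.zero_add]
  -- second write loop (offset L.length)
  rw [pv_writeLoop R.length _ (L ++ arr.drop L.length) L.length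
        (by simp; omega) (by simp)]
  have htakeL2 : (L ++ arr.drop L.length).take L.length = L := by
    rw [List.take_append]
    simp
  have htakeR : (R ++ List.replicate (arr.length - R.length) (0:Int)).take R.length = R := by
    rw [List.take_append]
    simp
  have hdrop : (L ++ arr.drop L.length).drop (L.length + R.length) = [] := by
    apply List.drop_eq_nil_of_le
    simp
    omega
  rw [htakeL2, htakeR, hdrop, List.append_nil]

theorem pv_B_eq (arr : List Int) :
    grouping_better_alt arr = arr.filter pvIsSquare ++ arr.filter (fun x => !pvIsSquare x) := by
  have h := pv_sortFold arr [] [] (by simp) (by simp)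
  simpa [PySem.List.sorted, pvIsSquare] using h

-- ===== VERDICT (by name: the statement is the Claim_ definition above) =====
theorem grouping_better_spec : Claim_equal_grouping_better := by
  intro arr _ _
  unfold Spec_grouping_better
  rw [pv_A_eq, pv_B_eq]
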